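-- pv_equiv track=rewrite | github.com/daniel-reich/turbo-robot | vudQZFD64nDWkKz8a_20.py | grant_the_hint
-- ===== SOURCE A (Python) =====
-- def grant_the_hint(s):
--     s = s.split()
--     m = len(max(s, key=len))
--     h = [[] for _ in range(m+1)]
--     for x in range(m + 1):
--         for w in s:
--             h[x].append(''.join([w[:x]] + ['_' for _ in w[x:]]))
--     return [' '.join(w) for w in h]
-- ===== SOURCE B (Python) =====
-- def grant_the_hint(s):
--     words = s.split()
--     m = max(len(w) for w in words)  # raises ValueError on empty input, like A
--     state = [['_'] * len(w) for w in words]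
--     rows = [' '.join(''.join(cs) for cs in state)]
--     for x in range(m):
--         for w, cs in zip(words, state):
--             if x < len(w):
--                 cs[x] = w[x]
--         rows.append(' '.join(''.join(cs) for cs in state))
--     return rows
-- ===== Notes on version B (the rewrite author's own statement) =====
-- stated objective: alternative
-- what changed: B replaces A's per-row recomputation of every cell (prefix-slice plus fresh underscore padding for each row x and word) with a single mutable per-word underscore buffer that is updated in place, revealing one character per round and snapshotting the joined row after each update.
import Mathlib
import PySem

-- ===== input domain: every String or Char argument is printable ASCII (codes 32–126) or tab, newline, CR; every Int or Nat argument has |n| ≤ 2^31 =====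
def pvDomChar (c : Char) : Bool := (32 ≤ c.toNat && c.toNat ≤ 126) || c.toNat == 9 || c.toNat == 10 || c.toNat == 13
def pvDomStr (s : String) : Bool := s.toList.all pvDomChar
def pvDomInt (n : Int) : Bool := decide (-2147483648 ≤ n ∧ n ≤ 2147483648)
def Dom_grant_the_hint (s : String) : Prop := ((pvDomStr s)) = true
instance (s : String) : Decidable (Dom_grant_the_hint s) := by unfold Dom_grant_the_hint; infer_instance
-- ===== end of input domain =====

-- B replaces A's per-row recomputation of every cell with a single mutable per-word
-- underscore buffer updated in place, one revealed character per round (alternative decomposition).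

-- ===== PORT A =====
-- for x in range(m+1): for w in s: h[x].append(''.join([w[:x]] + ['_' for _ in w[x:]]))
def grant_the_hint (s : String) : List String :=
  let ws := PySem.Str.split₀ s
  match PySem.List.max? ws (fun w => PySem.Str.len w) with
  | none => []    -- Python raises ValueError here; excluded by Pre_
  | some mw =>
    let m := PySem.Str.len mw
    let h := (PySem.List.pyRange 0 (m + 1)).map (fun x =>
      ws.map (fun w =>
        PySem.Str.join "" ([PySem.Str.slice w none (some x)] ++
          (PySem.Str.slice w (some x) none).toList.map (fun _ => "_"))))
    h.map (fun row => PySem.Str.join " " row)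

-- ===== PORT B =====
-- mutable per-word buffers of '_', updated in place; snapshot a row after each round
def grant_the_hint_alt (s : String) : List String :=
  let ws := (PySem.Str.split₀ s).map String.toList
  match ws.map List.length with
  | [] => []    -- Python raises ValueError here; excluded by Pre_
  | l :: ls =>
    let m := ls.foldl max l
    let st0 := ws.map (fun w => w.map (fun _ => '_'))
    let render := fun (st : List (List Char)) =>
      PySem.Str.join " " (st.map String.ofList)
    let out := (List.range m).foldl
      (fun (acc : List String × List (List Char)) x =>
        let st' := (ws.zip acc.2).map (fun p =>
          if x < p.1.length then p.2.set x (p.1.getD x '_') else p.2)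
        (acc.1 ++ [render st'], st'))
      ([render st0], st0)
    out.1

-- ===== PRECONDITION & SPEC =====
-- Pre_ excludes exactly the inputs with no words (s.split() == []), where A raises ValueError.
def Pre_grant_the_hint (s : String) : Prop := PySem.Str.split₀ s ≠ []
instance (s : String) : Decidable (Pre_grant_the_hint s) := by unfold Pre_grant_the_hint; infer_instance
def pvWitness_grant_the_hint : String := "ab c"
def Spec_grant_the_hint (s : String) (out : List String) : Prop := out = grant_the_hint_alt s
instance (s : String) (out : List String) : Decidable (Spec_grant_the_hint s out) := by unfold Spec_grant_the_hint; infer_instance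

-- ===== CLAIM (what is proved, stated in full; the proofs are below) =====
def Claim_equal_grant_the_hint : Prop := ∀ (s : String), Dom_grant_the_hint s → Pre_grant_the_hint s → Spec_grant_the_hint s (grant_the_hint s)

-- ===== LEMMAS AND PROOFS =====

-- closed form: the cell for word w in row x keeps the first x characters and pads with '_'
def pvCell (x : Nat) (w : List Char) : List Char :=
  w.mapIdx (fun i c => if i < x then c else '_')

def pvRow (wsL : List (List Char)) (x : Nat) : String :=
  PySem.Str.join " " (wsL.map (fun w => String.ofList (pvCell x w)))

lemma pvCell_zero (w : List Char) : pvCell 0 w = w.map (fun _ => '_') := by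
  apply List.ext_getElem <;> simp [pvCell]

lemma pvCell_eq_take_append (x : Nat) (w : List Char) :
    pvCell x w = w.take x ++ List.replicate (w.length - x) '_' := by
  apply List.ext_getElem
  · simp [pvCell]; omega
  · intro i h1 h2
    simp only [pvCell, List.getElem_mapIdx, List.getElem_append, List.getElem_take,
      List.getElem_replicate, List.length_take]
    simp [pvCell] at h1
    split_ifs with hx hy <;> simp_all <;> omega

lemma pvCell_step (x : Nat) (w : List Char) :
    (if x < w.length then (pvCell x w).set x (w.getD x '_') else pvCell x w)
      = pvCell (x + 1) w := by
  split_ifs with hx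
  · apply List.ext_getElem
    · simp [pvCell]
    · intro i h1 h2
      have hi : i < w.length := by simpa [pvCell] using h2
      rw [List.getElem_set]
      simp only [pvCell, List.getElem_mapIdx]
      rcases eq_or_ne x i with rfl | hne
      · simp [List.getD, List.getElem?_eq_getElem hx]
      · simp only [hne, if_false]
        split_ifs <;> first | rfl | omega
  · apply List.ext_getElem
    · simp [pvCell]
    · intro i h1 h2
      have hi : i < w.length := by simpa [pvCell] using h2
      simp only [pvCell, List.getElem_mapIdx]
      rw [if_pos (by omega : i < x), if_pos (by omega : i < x + 1)]

-- underscore padding: join of singleton underscores is replicate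
lemma pvFlattenInter (xs : List (List Char)) : ([] : List Char).intercalate xs = xs.flatten := by
  induction xs with
  | nil => rfl
  | cons a t ih =>
    cases t with
    | nil => simp [List.intercalate]
    | cons b u =>
      simp only [List.intercalate, List.intersperse, List.flatten_cons] at ih ⊢
      simp [ih]

lemma pvJoinNilCons (a : List Char) (parts : List (List Char)) :
    PySem.Chars.join [] (a :: parts) = a ++ PySem.Chars.join [] parts := by
  simp [PySem.Chars.join, pvFlattenInter]

lemma pvPad (l : List Char) :
    PySem.Chars.join [] (l.map (fun _ => ['_'])) = List.replicate l.length '_' := by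
  rw [PySem.Chars.join, pvFlattenInter]
  induction l with
  | nil => rfl
  | cons c t _ => simp [List.replicate_succ]


-- A's cell expression equals the closed-form cell
lemma pvCellA (x : Nat) (w : String) :
    PySem.Str.join "" ([PySem.Str.slice w none (some (x : Int))] ++
      (PySem.Str.slice w (some (x : Int)) none).toList.map (fun _ => "_"))
      = String.ofList (pvCell x w.toList) := by
  apply String.toList_inj.mp
  rw [PySem.Str.toList_join]
  simp only [List.map_append, List.map_map, List.map_cons, List.map_nil]
  have h1 : (PySem.Str.slice w none (some (x : Int))).toList = w.toList.take x := by
    rw [PySem.Str.toList_slice]; exact PySem.List.slice_to _ (by positivity)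
  have h2 : (PySem.Str.slice w (some (x : Int)) none).toList = w.toList.drop x := by
    rw [PySem.Str.toList_slice]; exact PySem.List.slice_from _ (by positivity)
  have h3 : (String.toList ∘ fun _ => ("_" : String)) = (fun (_ : Char) => ['_']) := by
    funext c; simp [Function.comp]
  have hnil : ("" : String).toList = [] := rfl
  rw [h1, h2, h3, List.singleton_append, hnil, pvJoinNilCons, pvPad,
    pvCell_eq_take_append]
  simp

-- pyRange 0 n with step 1 is List.range n (as Ints)
lemma pvRange_self (a : Int) : PySem.List.pyRange a a = [] := by
  have h := PySem.List.pyRange_one_append a a a le_rfl le_rfl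
  cases he : PySem.List.pyRange a a with
  | nil => rfl
  | cons y t => rw [he] at h; exact absurd (congrArg List.length h) (by simp)

lemma pvRange_natCast (n : Nat) :
    PySem.List.pyRange 0 (n : Int) = (List.range n).map Int.ofNat := by
  induction n with
  | zero => simpa using pvRange_self 0
  | succ k ih =>
    have h1 : ((k + 1 : Nat) : Int) = (k : Int) + 1 := by push_cast; ring
    rw [h1, PySem.List.pyRange_one_append 0 k ((k : Int) + 1) (by positivity) (by omega),
      PySem.List.pyRange_one_cons (by omega : (k : Int) < (k : Int) + 1), pvRange_self, ih]
    simp [List.range_succ]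

lemma pvZipSelf {A B : Type} (f : A → B) (l : List A) :
    l.zip (l.map f) = l.map (fun w => (w, f w)) := by
  induction l with
  | nil => rfl
  | cons a t ih => simpa using ih

-- B's fold invariant
lemma pvFoldB (wsL : List (List Char)) (m : Nat) :
    ((List.range m).foldl
      (fun (acc : List String × List (List Char)) x =>
        let st' := (wsL.zip acc.2).map (fun p =>
          if x < p.1.length then p.2.set x (p.1.getD x '_') else p.2)
        (acc.1 ++ [PySem.Str.join " " (st'.map String.ofList)], st'))
      ([PySem.Str.join " " ((wsL.map (fun w => w.map (fun _ => '_'))).map String.ofList)],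
        wsL.map (fun w => w.map (fun _ => '_'))))
      = ((List.range (m + 1)).map (pvRow wsL), wsL.map (pvCell m)) := by
  induction m with
  | zero =>
    simp only [List.range_zero, List.foldl_nil, Prod.mk.injEq]
    refine ⟨?_, ?_⟩
    · simp [pvRow, pvCell_zero, List.range_succ, Function.comp_def]
    · simp [pvCell_zero]
  | succ k ih =>
    rw [List.range_succ, List.foldl_append, ih]
    simp only [List.foldl_cons, List.foldl_nil]
    have hzip : (wsL.zip (wsL.map (pvCell k))).map (fun p =>
        if k < p.1.length then p.2.set k (p.1.getD k '_') else p.2)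
        = wsL.map (pvCell (k + 1)) := by
      have : wsL.zip (wsL.map (pvCell k)) = wsL.map (fun w => (w, pvCell k w)) :=
        pvZipSelf (pvCell k) wsL
      rw [this, List.map_map]
      exact List.map_congr_left (fun w _ => pvCell_step k w)
    rw [hzip]
    simp only [Prod.mk.injEq]
    refine ⟨?_, by simp⟩
    rw [List.range_succ (n := k + 1), List.map_append]
    simp [pvRow, Function.comp_def]

-- A's max word length equals B's running maximum of the lengths
lemma pvMaxEq (w0 : String) (wt : List String) (mw : String)
    (hmax : PySem.List.max? (w0 :: wt) (fun w => PySem.Str.len w) = some mw) :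
    mw.toList.length
      = (wt.map (fun w => w.toList.length)).foldl max w0.toList.length := by
  have hmem := PySem.List.max?_mem hmax
  have hub := PySem.List.max?_isMax hmax
  set F := (wt.map (fun w => w.toList.length)).foldl max w0.toList.length with hF
  have hfold := PySem.List.le_foldl_max (wt.map (fun w => w.toList.length)) w0.toList.length
  apply le_antisymm
  · -- mw's length ≤ F
    rcases List.mem_cons.mp hmem with h | h
    · subst h; exact hfold.1
    · exact hfold.2 _ (List.mem_map_of_mem h)
  · -- F ≤ mw's length: F is the length of some word
    rcases PySem.List.foldl_max_mem (wt.map (fun w => w.toList.length)) w0.toList.length with h | h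
    · rw [← hF] at h
      have := hub w0 (by simp)
      simp only [PySem.Str.len_eq] at this
      omega
    · rw [← hF] at h
      rcases List.mem_map.mp h with ⟨w, hw, hlen⟩
      have := hub w (by simp [hw])
      simp only [PySem.Str.len_eq] at this
      omega

-- ===== VERDICT (by name: the statement is the Claim_ definition above) =====
theorem grant_the_hint_spec : Claim_equal_grant_the_hint := by
  intro s _ hpre
  unfold Spec_grant_the_hint grant_the_hint grant_the_hint_alt
  cases hws : PySem.Str.split₀ s with
  | nil => exact absurd hws hpre
  | cons w0 wt =>
    simp only
    cases hmax : PySem.List.max? (w0 :: wt) (fun w => PySem.Str.len w) with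
    | none => exact absurd ((PySem.List.max?_eq_none_iff _ _).mp hmax) (by simp)
    | some mw =>
      simp only [List.map_cons]
      have hMnat : (PySem.Str.len mw + 1) = ((mw.toList.length + 1 : Nat) : Int) := by
        rw [PySem.Str.len_eq]; push_cast; ring
      rw [hMnat, pvRange_natCast, List.map_map, List.map_map]
      have hArow : ∀ x : Nat,
          ((w0 :: wt).map (fun w =>
            PySem.Str.join "" ([PySem.Str.slice w none (some (x : Int))] ++
              (PySem.Str.slice w (some (x : Int)) none).toList.map (fun _ => "_"))))
            = (w0.toList :: wt.map String.toList).map (fun w => String.ofList (pvCell x w)) := by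
        intro x
        rw [show w0.toList :: wt.map String.toList = (w0 :: wt).map String.toList from rfl,
          List.map_map]
        exact List.map_congr_left (fun w _ => pvCellA x w)
      refine Eq.trans (List.map_congr_left
        (l := List.range (mw.toList.length + 1))
        (g := fun x : Nat => PySem.Str.join " "
          ((w0.toList :: wt.map String.toList).map (fun w => String.ofList (pvCell x w))))
        (fun x _ => congrArg (fun row => PySem.Str.join " " row) (hArow x))) ?_
      have hM : List.foldl max w0.toList.length (List.map List.length (List.map String.toList wt))
          = mw.toList.length := by
        have h := pvMaxEq w0 wt mw hmax
        rw [h, List.map_map]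
        rfl
      rw [← hM]
      exact (congrArg Prod.fst
        (pvFoldB (w0.toList :: wt.map String.toList)
          (List.foldl max w0.toList.length (List.map List.length (List.map String.toList wt))))).symm
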